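-- pv_equiv track=rewrite | github.com/kyungjinleelee/Algorithm | 프로그래머스/0/181916. 주사위 게임 3/주사위 게임 3.py | solution
-- ===== SOURCE A (Python) =====
-- def solution(a, b, c, d):
--     # 주사위 숫자를 리스트에 담고 정렬
--     dice = [a, b, c, d]
--     dice.sort()
--
--     # 주사위 숫자의 빈도를 카운트
--     count = {}
--     for num in dice:
--         if num in count:
--             count[num] += 1
--         else:
--             count[num] = 1
--
--     # 숫자가 모두 같을 때
--     if len(count) == 1:
--         p = dice[0]
--         return 1111 * p
--     # 세 주사위가 같거나 or 두 개씩 같은 값일 경우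
--     elif len(count) == 2:  # ex) [4, 4, 4, 1] or [6, 3, 3, 6]
--         values = list(count.values())
--         keys = list(count.keys())
--         # 세 주사위가 같은 경우
--         if 3 in values:
--             p = keys[values.index(3)] # 3번 나온 숫자
--             q = keys[values.index(1)] # 1번 나온 숫자
--             return (10 * p + q) ** 2
--         # 두 개씩 같은 숫자가 나오는 경우
--         else:
--             p, q = keys
--             return (p + q) * abs(p - q)
--     # 두 주사위가 같은 숫자가 나오는 경우 ex) [4, 4, 1, 3]
--     elif len(count) == 3:
--         values = list(count.values())
--         keys = list(count.keys())
--         p = keys[values.index(2)] # 2번 나온 숫자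
--         keys.remove(p)
--         q, r = keys
--         return q * r
--     # 네 주사위의 숫자가 모두 다를 경우
--     else:
--         return min(dice)
-- ===== SOURCE B (Python) =====
-- def solution(a, b, c, d):
--     s = sorted([a, b, c, d])
--     if s[0] == s[3]:                      # four of a kind
--         return 1111 * s[0]
--     if s[0] == s[2]:                      # triple at the front
--         return (10 * s[0] + s[3]) ** 2
--     if s[1] == s[3]:                      # triple at the back
--         return (10 * s[1] + s[0]) ** 2
--     if s[0] == s[1] and s[2] == s[3]:     # two pairs
--         return (s[0] + s[2]) * abs(s[0] - s[2])
--     if s[0] == s[1]:                      # one pair (front)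
--         return s[2] * s[3]
--     if s[1] == s[2]:                      # one pair (middle)
--         return s[0] * s[3]
--     if s[2] == s[3]:                      # one pair (back)
--         return s[0] * s[1]
--     return s[0]                           # all different
-- ===== Notes on version B (the rewrite author's own statement) =====
-- stated objective: simpler
-- what changed: B drops A's frequency dictionary (build dict, branch on its size, index keys by values.index) and classifies the hand directly by adjacent-equality tests on the sorted four dice.
import Mathlib
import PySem

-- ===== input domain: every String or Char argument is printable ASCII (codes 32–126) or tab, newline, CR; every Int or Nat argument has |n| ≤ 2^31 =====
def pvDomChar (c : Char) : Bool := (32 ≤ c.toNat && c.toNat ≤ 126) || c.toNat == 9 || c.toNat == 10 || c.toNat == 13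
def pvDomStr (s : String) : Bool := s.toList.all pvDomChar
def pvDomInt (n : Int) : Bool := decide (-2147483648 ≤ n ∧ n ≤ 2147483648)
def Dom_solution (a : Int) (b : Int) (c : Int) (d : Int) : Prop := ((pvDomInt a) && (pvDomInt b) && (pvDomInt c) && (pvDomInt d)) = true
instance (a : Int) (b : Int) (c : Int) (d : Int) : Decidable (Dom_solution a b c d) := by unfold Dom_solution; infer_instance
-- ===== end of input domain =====

-- B replaces A's frequency-dictionary case analysis by adjacent-equality tests on the sorted dice (simpler decomposition, no dict).

-- ===== PORT A =====
def solution (a : Int) (b : Int) (c : Int) (d : Int) : Int :=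
  let dice := PySem.List.sorted [a, b, c, d] (fun x => x) false
  let count := dice.foldl
    (fun cnt num =>
      if cnt.contains num then cnt.insert num (((cnt.get? num).getD 0) + 1)
      else cnt.insert num 1)
    (PySem.Dict.empty : PySem.Dict Int Int)
  if count.size = 1 then
    1111 * PySem.List.pyGetD dice 0 0
  else if count.size = 2 then
    let values := count.values
    let keys := count.keys
    if values.contains 3 then
      let p := match PySem.List.index? values 3 with
        | some i => keys.getD i 0 | none => 0   -- none unreachable: 3 ∈ values in this branch
      let q := match PySem.List.index? values 1 with
        | some i => keys.getD i 0 | none => 0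
      (10 * p + q) ^ 2
    else
      match keys with
      | [p, q] => (p + q) * |p - q|
      | _ => 0                                  -- unreachable: size = 2
  else if count.size = 3 then
    let values := count.values
    let keys := count.keys
    let p := match PySem.List.index? values 2 with
      | some i => keys.getD i 0 | none => 0
    match (PySem.List.remove? keys p).getD [] with
    | [q, r] => q * r
    | _ => 0                                    -- unreachable: size = 3
  else
    match PySem.List.min? dice (fun x => x) with
    | some m => m | none => 0                   -- none unreachable: dice nonempty

-- ===== PORT B =====
def solution_alt (a : Int) (b : Int) (c : Int) (d : Int) : Int :=
  let s := PySem.List.sorted [a, b, c, d] (fun x => x) false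
  let s0 := PySem.List.pyGetD s 0 0
  let s1 := PySem.List.pyGetD s 1 0
  let s2 := PySem.List.pyGetD s 2 0
  let s3 := PySem.List.pyGetD s 3 0
  if s0 = s3 then 1111 * s0
  else if s0 = s2 then (10 * s0 + s3) ^ 2
  else if s1 = s3 then (10 * s1 + s0) ^ 2
  else if s0 = s1 ∧ s2 = s3 then (s0 + s2) * |s0 - s2|
  else if s0 = s1 then s2 * s3
  else if s1 = s2 then s0 * s3
  else if s2 = s3 then s0 * s1
  else s0

-- ===== PRECONDITION & SPEC =====
def Spec_solution (a : Int) (b : Int) (c : Int) (d : Int) (out : Int) : Prop := out = solution_alt a b c d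
instance (a : Int) (b : Int) (c : Int) (d : Int) (out : Int) : Decidable (Spec_solution a b c d out) := by unfold Spec_solution; infer_instance

-- ===== CLAIM (what is proved, stated in full; the proofs are below) =====
def Claim_equal_solution : Prop := ∀ (a : Int) (b : Int) (c : Int) (d : Int), Dom_solution a b c d → Spec_solution a b c d (solution a b c d)

-- ===== LEMMAS AND PROOFS =====

-- the sorted four-dice list is some [w, x, y, z] with w ≤ x ≤ y ≤ z
theorem sorted4_shape (a b c d : Int) :
    ∃ w x y z : Int, PySem.List.sorted [a, b, c, d] (fun t => t) false = [w, x, y, z] ∧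
      w ≤ x ∧ x ≤ y ∧ y ≤ z := by
  have hlen : (PySem.List.sorted [a, b, c, d] (fun t => t) false).length = 4 := by
    simp [PySem.List.length_sorted]
  have hpw := PySem.List.sorted_pairwise (xs := [a, b, c, d]) (key := fun t => t)
  match hs : PySem.List.sorted [a, b, c, d] (fun t => t) false with
  | [w, x, y, z] =>
    rw [hs] at hpw
    simp [List.pairwise_cons] at hpw
    exact ⟨w, x, y, z, rfl, hpw.1.1, hpw.2.1.1, hpw.2.2⟩
  | [] | [_] | [_, _] | [_, _, _] | _ :: _ :: _ :: _ :: _ :: _ => simp [hs] at hlen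

-- ===== VERDICT (by name: the statement is the Claim_ definition above) =====
set_option maxHeartbeats 1600000 in
theorem solution_spec : Claim_equal_solution := by
  intro a b c d _
  unfold Spec_solution solution solution_alt
  obtain ⟨w, x, y, z, hs, hwx, hxy, hyz⟩ := sorted4_shape a b c d
  rw [hs]
  rcases hwx.lt_or_eq with h1 | h1 <;>
    rcases hxy.lt_or_eq with h2 | h2 <;>
      rcases hyz.lt_or_eq with h3 | h3
  all_goals (
    try have n1 : w ≠ x := by omega
    try have n2 : w ≠ y := by omega
    try have n3 : w ≠ z := by omega
    try have n4 : x ≠ y := by omega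
    try have n5 : x ≠ z := by omega
    try have n6 : y ≠ z := by omega
    try have m1 : x ≠ w := by omega
    try have m2 : y ≠ w := by omega
    try have m3 : z ≠ w := by omega
    try have m4 : y ≠ x := by omega
    try have m5 : z ≠ x := by omega
    try have m6 : z ≠ y := by omega)
  all_goals simp_all [PySem.Dict.empty, PySem.Dict.insert, PySem.Dict.contains,
    PySem.Dict.get?, PySem.Dict.size, PySem.Dict.keys, PySem.Dict.values,
    PySem.List.index?, PySem.List.remove?, PySem.List.min?_id_cons, List.foldl, PySem.List.pyGetD,
    List.idxOf?, List.findIdx?, List.findIdx?.go, List.eraseIdx, beq_iff_eq]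
  all_goals omega
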